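-- pv_equiv track=rewrite | github.com/networkslab/gmcd | src/metrics.py | one_error
-- ===== SOURCE A (Python) =====
-- def one_error(key):
--     tokens = key.split('-')
--     s = len(tokens)
--     dict_in = {}
--     for i in tokens:
--         if i in dict_in:
--             if dict_in[i] == 1:
--                 dict_in[i] += 1
--             else:
--                 return False
--         else:
--             dict_in[i] = 1
--     if len(dict_in.keys()) == s:
--         return False
--     return True
-- ===== SOURCE B (Python) =====
-- def one_error(key):
--     tokens = key.split('-')
--     return max(tokens.count(t) for t in tokens) == 2
-- ===== Notes on version B (the rewrite author's own statement) =====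
-- stated objective: simpler
-- what changed: Replaces A's dict-with-early-return loop plus distinct-count check by a direct one-liner: the maximum token multiplicity equals 2 (no dict, no early exit).
import Mathlib
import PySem

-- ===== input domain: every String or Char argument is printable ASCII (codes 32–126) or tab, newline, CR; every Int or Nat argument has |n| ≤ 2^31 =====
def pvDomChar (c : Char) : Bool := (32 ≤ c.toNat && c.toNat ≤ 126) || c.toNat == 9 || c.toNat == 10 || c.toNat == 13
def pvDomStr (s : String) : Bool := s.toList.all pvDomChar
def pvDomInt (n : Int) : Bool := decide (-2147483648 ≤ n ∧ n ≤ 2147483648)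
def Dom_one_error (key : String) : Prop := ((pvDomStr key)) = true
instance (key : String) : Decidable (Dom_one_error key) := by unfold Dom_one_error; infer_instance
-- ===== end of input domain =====

-- B replaces A's dict-with-early-return loop and distinct-count check by the direct
-- one-liner "the maximum token multiplicity equals 2" (objective: simpler; not faster).

-- ===== PORT A =====
-- the 'for i in tokens' loop of A: dict_in maps a token to its count so far;
-- 'none' is the early 'return False' on a third occurrence
def oneErrorLoop : List String → PySem.Dict String Int → Option (PySem.Dict String Int)
  | [], d => some d
  | i :: rest, d =>
    if d.contains i then
      if d.getD i 0 == 1 then oneErrorLoop rest (d.modify i 0 (· + 1))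
      else none
    else oneErrorLoop rest (d.insert i 1)

def one_error (key : String) : Bool :=
  let tokens := (PySem.Str.split? key "-").getD []   -- sep "-" ≠ "": split? is always some
  let s := tokens.length
  match oneErrorLoop tokens PySem.Dict.empty with
  | none => false
  | some d => if d.keys.length == s then false else true

-- ===== PORT B =====
def one_error_alt (key : String) : Bool :=
  let tokens := (PySem.Str.split? key "-").getD []   -- sep "-" ≠ "": split? is always some
  -- max(tokens.count(t) for t in tokens) == 2 ; tokens is never empty, so the none
  -- branch (Python's ValueError on max of an empty sequence) is unreachable
  match PySem.List.max? (tokens.map fun t => (PySem.List.count tokens t : Int)) (fun x => x) with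
  | some m => m == 2
  | none => false

-- ===== PRECONDITION & SPEC =====
def Spec_one_error (key : String) (out : Bool) : Prop := out = one_error_alt key
instance (key : String) (out : Bool) : Decidable (Spec_one_error key out) := by unfold Spec_one_error; infer_instance

-- ===== CLAIM (what is proved, stated in full; the proofs are below) =====
def Claim_equal_one_error : Prop := ∀ (key : String), Dom_one_error key → Spec_one_error key (one_error key)

-- ===== LEMMAS AND PROOFS =====

-- appending an element already seen leaves the set of first occurrences unchanged
theorem ofList_append_mem (h : List String) (i : String) (hm : i ∈ h) :
    PySem.Set.ofList (h ++ [i]) = PySem.Set.ofList h := by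
  simp only [PySem.Set.ofList, List.foldl_append, List.foldl_cons, List.foldl_nil,
    PySem.Set.add, PySem.Set.contains]
  rw [if_pos]
  simp only [List.contains_eq_mem, decide_eq_true_eq]
  exact (PySem.Set.mem_ofList h i).mpr hm

-- appending a fresh element appends it to the set of first occurrences
theorem ofList_append_not_mem (h : List String) (i : String) (hm : i ∉ h) :
    PySem.Set.ofList (h ++ [i]) = PySem.Set.ofList h ++ [i] := by
  simp only [PySem.Set.ofList, List.foldl_append, List.foldl_cons, List.foldl_nil,
    PySem.Set.add, PySem.Set.contains]
  rw [if_neg]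
  simp only [List.contains_eq_mem, decide_eq_true_eq]
  intro hc; exact hm ((PySem.Set.mem_ofList h i).mp hc)

-- A's loop never returns early when every multiplicity in the whole run h ++ l is ≤ 2,
-- and then the final dict's keys are the distinct elements of h ++ l.
theorem oneErrorLoop_some (l : List String) : ∀ (h : List String) (d : PySem.Dict String Int),
    (∀ x, d.getD x 0 = ((h.count x : Nat) : Int)) → d.keys = PySem.Set.ofList h →
    (∀ x, (h ++ l).count x ≤ 2) →
    ∃ d', oneErrorLoop l d = some d' ∧ d'.keys = PySem.Set.ofList (h ++ l) := by
  induction l with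
  | nil => intro h d hc hk _; exact ⟨d, rfl, by simpa using hk⟩
  | cons i rest ih =>
    intro h d hc hk hle
    by_cases hmem : i ∈ h
    · -- seen before: its count in h must be 1, A increments it to 2
      have hcont : d.contains i = true :=
        (PySem.Dict.contains_iff_mem_keys d i).mpr (by rw [hk]; exact (PySem.Set.mem_ofList h i).mpr hmem)
      have h1 : h.count i = 1 := by
        have hle' := hle i
        have hpos : 0 < h.count i := List.count_pos_iff.mpr hmem
        simp [List.count_append] at hle'
        omega
      have hgd : d.getD i 0 = 1 := by rw [hc i, h1]; norm_num
      obtain ⟨d', hd', hk'⟩ := ih (h ++ [i]) (d.modify i 0 (· + 1))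
        (by
          intro x
          rw [PySem.Dict.getD_modify]
          by_cases hx : x = i
          · subst hx; simp [hgd, List.count_append, h1]
          · simp [hx, hc x, List.count_append, Ne.symm hx])
        (by
          rw [PySem.Dict.keys_modify, PySem.Dict.keys_insert_of_contains _ _ hcont, hk,
            ofList_append_mem h i hmem])
        (by intro x; have := hle x; simp [List.count_append, List.count_cons] at this ⊢; omega)
      refine ⟨d', ?_, ?_⟩
      · simp only [oneErrorLoop, hcont, if_true, hgd]
        simpa using hd'
      · rw [hk']; simp
    · -- fresh token: A inserts it with count 1
      have hcont : d.contains i = false := by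
        rw [Bool.eq_false_iff]
        intro hc'
        exact hmem ((PySem.Set.mem_ofList h i).mp (hk ▸ (PySem.Dict.contains_iff_mem_keys d i).mp hc'))
      obtain ⟨d', hd', hk'⟩ := ih (h ++ [i]) (d.insert i 1)
        (by
          intro x
          rw [PySem.Dict.getD_insert]
          by_cases hx : x = i
          · subst hx; simp [List.count_append, List.count_eq_zero_of_not_mem hmem]
          · simp [hx, hc x, List.count_append, Ne.symm hx])
        (by rw [PySem.Dict.keys_insert_of_not_contains _ _ hcont, hk, ofList_append_not_mem h i hmem])
        (by intro x; have := hle x; simp [List.count_append, List.count_cons] at this ⊢; omega)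
      refine ⟨d', ?_, ?_⟩
      · simp only [oneErrorLoop, hcont, Bool.false_eq_true, if_false]
        simpa using hd'
      · rw [hk']; simp

-- A's loop returns early (the 'return False') as soon as some token occurs a third time.
theorem oneErrorLoop_none (l : List String) : ∀ (h : List String) (d : PySem.Dict String Int),
    (∀ x, d.getD x 0 = ((h.count x : Nat) : Int)) → d.keys = PySem.Set.ofList h →
    (∀ x, h.count x ≤ 2) →
    (∃ x, 3 ≤ (h ++ l).count x) →
    oneErrorLoop l d = none := by
  induction l with
  | nil =>
    intro h d _ _ hle ⟨x, hx⟩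
    simp only [List.append_nil] at hx
    exact absurd hx (by have := hle x; omega)
  | cons i rest ih =>
    intro h d hc hk hle hex
    by_cases hmem : i ∈ h
    · have hcont : d.contains i = true :=
        (PySem.Dict.contains_iff_mem_keys d i).mpr (by rw [hk]; exact (PySem.Set.mem_ofList h i).mpr hmem)
      have hpos : 0 < h.count i := List.count_pos_iff.mpr hmem
      by_cases h2 : h.count i = 2
      · -- third occurrence: dict_in[i] == 2, A returns False right here
        have hgd : d.getD i 0 = 2 := by rw [hc i, h2]; norm_num
        simp [oneErrorLoop, hcont, hgd]
      · have h1 : h.count i = 1 := by have := hle i; omega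
        have hgd : d.getD i 0 = 1 := by rw [hc i, h1]; norm_num
        have := ih (h ++ [i]) (d.modify i 0 (· + 1))
          (by
            intro x
            rw [PySem.Dict.getD_modify]
            by_cases hx : x = i
            · subst hx; simp [hgd, List.count_append, h1]
            · simp [hx, hc x, List.count_append, Ne.symm hx])
          (by
            rw [PySem.Dict.keys_modify, PySem.Dict.keys_insert_of_contains _ _ hcont, hk,
              ofList_append_mem h i hmem])
          (by
            intro x
            by_cases hx : x = i
            · subst hx; simp [List.count_append, h1]
            · have := hle x; simp [List.count_append, Ne.symm hx]; omega)
          (by obtain ⟨x, hx⟩ := hex; exact ⟨x, by rw [List.append_assoc]; simpa using hx⟩)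
        simp only [oneErrorLoop, hcont, if_true, hgd]
        simpa using this
    · have hcont : d.contains i = false := by
        rw [Bool.eq_false_iff]
        intro hc'
        exact hmem ((PySem.Set.mem_ofList h i).mp (hk ▸ (PySem.Dict.contains_iff_mem_keys d i).mp hc'))
      have := ih (h ++ [i]) (d.insert i 1)
        (by
          intro x
          rw [PySem.Dict.getD_insert]
          by_cases hx : x = i
          · subst hx; simp [List.count_append, List.count_eq_zero_of_not_mem hmem]
          · simp [hx, hc x, List.count_append, Ne.symm hx])
        (by rw [PySem.Dict.keys_insert_of_not_contains _ _ hcont, hk, ofList_append_not_mem h i hmem])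
        (by
          intro x
          by_cases hx : x = i
          · subst hx; simp [List.count_append, List.count_eq_zero_of_not_mem hmem]
          · have := hle x; simp [List.count_append, Ne.symm hx]; omega)
        (by obtain ⟨x, hx⟩ := hex; exact ⟨x, by rw [List.append_assoc]; simpa using hx⟩)
      simp only [oneErrorLoop, hcont, Bool.false_eq_true, if_false]
      simpa using this

-- the claim over the shared token list: A's loop-and-check equals "max multiplicity == 2"
theorem core_eq (l : List String) :
    (match oneErrorLoop l PySem.Dict.empty with
      | none => false
      | some d => if d.keys.length == l.length then false else true) =
    (match PySem.List.max? (l.map fun t => (PySem.List.count l t : Int)) (fun x => x) with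
      | some m => m == 2
      | none => false) := by
  rcases hl : l with _ | ⟨a, t⟩
  · rfl
  rw [← hl]
  have hnil : l ≠ [] := by simp [hl]
  -- the max over the (nonempty) list of multiplicities
  rcases hmax : PySem.List.max? (l.map fun t => (PySem.List.count l t : Int)) (fun x => x) with _ | m
  · exact absurd (List.map_eq_nil_iff.mp ((PySem.List.max?_eq_none_iff _ _).mp hmax)) hnil
  obtain ⟨t0, ht0, hm⟩ := List.mem_map.mp (PySem.List.max?_mem hmax)
  rw [PySem.List.count_eq] at hm
  have hmaxge : ∀ x ∈ l, ((l.count x : Nat) : Int) ≤ m := by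
    intro x hx
    have := PySem.List.max?_isMax hmax _ (List.mem_map.mpr ⟨x, hx, rfl⟩)
    simpa [PySem.List.count_eq] using this
  by_cases hp : ∀ x, l.count x ≤ 2
  · obtain ⟨d', hd', hk⟩ := oneErrorLoop_some l [] PySem.Dict.empty
      (by intro x; simp [PySem.Dict.getD_empty])
      (by simp [PySem.Dict.keys_empty, PySem.Set.ofList])
      (by simpa using hp)
    rw [hd']
    simp only [hk, List.nil_append]
    -- the set of distinct tokens has the length of l.dedup
    have hperm : (PySem.Set.ofList l).Perm l.dedup :=
      (List.perm_ext_iff_of_nodup (PySem.Set.nodup_ofList l) l.nodup_dedup).mpr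
        (by intro x; simp [PySem.Set.mem_ofList, List.mem_dedup])
    have hlen : (PySem.Set.ofList l).length = l.dedup.length := hperm.length_eq
    by_cases hnd : l.Nodup
    · -- all tokens distinct: A returns False, and the maximal multiplicity is 1
      have : l.dedup.length = l.length := by rw [List.dedup_eq_self.mpr hnd]
      have hcnt1 : l.count t0 = 1 := by
        have := List.nodup_iff_count_le_one.mp hnd t0
        have := List.count_pos_iff.mpr ht0
        omega
      have hm1 : m = 1 := by rw [← hm, hcnt1]; norm_num
      simp [hlen, this, hm1]
    · -- a duplicate exists: A returns True, and some multiplicity is exactly 2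
      have hne : l.dedup.length ≠ l.length := by
        intro he
        exact hnd (List.dedup_eq_self.mp (l.dedup_sublist.eq_of_length he))
      obtain ⟨x, hx2⟩ : ∃ x, 2 ≤ l.count x := by
        by_contra hno
        push Not at hno
        exact hnd (List.nodup_iff_count_le_one.mpr fun x => by have := hno x; omega)
      have hxl : x ∈ l := List.count_pos_iff.mp (by omega)
      have hx2' : l.count x = 2 := by have := hp x; omega
      have hm2 : m = 2 := by
        have hge := hmaxge x hxl
        have hle2 : m ≤ 2 := by
          rw [← hm]
          have := hp t0
          exact_mod_cast this
        rw [hx2'] at hge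
        omega
      simp [hlen, hne, hm2]
  · -- some token occurs three times: A returns False early, and the max is ≥ 3
    push Not at hp
    obtain ⟨x, hx3⟩ := hp
    have hx3 : 3 ≤ l.count x := hx3
    have hxl : x ∈ l := List.count_pos_iff.mp (by omega)
    rw [oneErrorLoop_none l [] PySem.Dict.empty
      (by intro x; simp [PySem.Dict.getD_empty])
      (by simp [PySem.Dict.keys_empty, PySem.Set.ofList])
      (by simp)
      ⟨x, by simpa using hx3⟩]
    have : (3 : Int) ≤ m := le_trans (by exact_mod_cast hx3) (hmaxge x hxl)
    have : (m == 2) = false := by simpa using (by omega : m ≠ 2)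
    simp [this]

-- ===== VERDICT (by name: the statement is the Claim_ definition above) =====
theorem one_error_spec : Claim_equal_one_error := by
  intro key _
  unfold Spec_one_error one_error one_error_alt
  exact core_eq _
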